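-- pv_equiv track=rewrite | github.com/pducolin/advent-of-code-2020 | src/y2020/day_16/part_2.py | is_valid_ticket
-- ===== SOURCE A (Python) =====
-- def is_valid_ticket(rules, ticket):
--     found_counter = 0
--     for value in ticket:
--         for _, rule_range in rules.items():
--             if value in rule_range:
--                 found_counter += 1
--                 break
--     return found_counter == len(ticket)
-- ===== SOURCE B (Python) =====
-- def is_valid_ticket(rules, ticket):
--     valid = set()
--     for rule_range in rules.values():
--         valid.update(rule_range)
--     return all(v in valid for v in ticket)
-- ===== Notes on version B (the rewrite author's own statement) =====
-- stated objective: faster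
-- what changed: B builds one union set of all valid values from the rule ranges up front, then checks the ticket in a single flat membership pass, eliminating A's per-value inner scan over every rule range.
import Mathlib
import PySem

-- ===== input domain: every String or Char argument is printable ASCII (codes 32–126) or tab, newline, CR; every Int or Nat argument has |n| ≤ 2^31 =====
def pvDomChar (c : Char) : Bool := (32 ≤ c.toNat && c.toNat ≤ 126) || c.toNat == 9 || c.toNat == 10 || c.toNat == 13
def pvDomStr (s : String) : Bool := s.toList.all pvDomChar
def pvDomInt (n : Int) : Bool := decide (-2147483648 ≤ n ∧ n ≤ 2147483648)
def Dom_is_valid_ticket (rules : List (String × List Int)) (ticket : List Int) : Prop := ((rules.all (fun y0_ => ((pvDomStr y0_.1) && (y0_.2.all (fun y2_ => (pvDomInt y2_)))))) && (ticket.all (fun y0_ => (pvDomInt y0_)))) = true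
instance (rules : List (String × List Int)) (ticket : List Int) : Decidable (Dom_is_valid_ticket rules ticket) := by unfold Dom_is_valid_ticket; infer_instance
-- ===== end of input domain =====

-- B builds the union set of all rule-range values once, then checks the ticket in one flat
-- membership pass (faster); A scans every rule range for every ticket value.

-- ===== PORT A =====
-- inner 'for _, rule_range in rules.items(): if value in rule_range: …; break'
def pvFindRule : List (String × List Int) → Int → Bool
  | [], _ => false
  | (_, r) :: rest, v => if r.contains v then true else pvFindRule rest v

def is_valid_ticket (rules : List (String × List Int)) (ticket : List Int) : Bool :=
  let found_counter :=
    ticket.foldl (fun c value => if pvFindRule rules value then c + 1 else c) (0 : Nat)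
  found_counter == ticket.length

-- ===== PORT B =====
def is_valid_ticket_alt (rules : List (String × List Int)) (ticket : List Int) : Bool :=
  let valid := rules.foldl (fun s p => PySem.Set.update s p.2) (PySem.Set.empty : PySem.Set Int)
  ticket.all (fun v => PySem.Set.contains valid v)

-- ===== PRECONDITION & SPEC =====
def Spec_is_valid_ticket (rules : List (String × List Int)) (ticket : List Int) (out : Bool) : Prop := out = is_valid_ticket_alt rules ticket
instance (rules : List (String × List Int)) (ticket : List Int) (out : Bool) : Decidable (Spec_is_valid_ticket rules ticket out) := by unfold Spec_is_valid_ticket; infer_instance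

-- ===== CLAIM (what is proved, stated in full; the proofs are below) =====
def Claim_equal_is_valid_ticket : Prop := ∀ (rules : List (String × List Int)) (ticket : List Int), Dom_is_valid_ticket rules ticket → Spec_is_valid_ticket rules ticket (is_valid_ticket rules ticket)

-- ===== LEMMAS AND PROOFS =====

theorem mem_foldl_update (rules : List (String × List Int)) (s : PySem.Set Int) (v : Int) :
    v ∈ rules.foldl (fun s p => PySem.Set.update s p.2) s ↔ v ∈ s ∨ ∃ p ∈ rules, v ∈ p.2 := by
  induction rules generalizing s with
  | nil => simp
  | cons p rest ih =>
      simp [List.foldl_cons, ih, PySem.Set.mem_update]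
      tauto

theorem pvFindRule_iff (rules : List (String × List Int)) (v : Int) :
    pvFindRule rules v = true ↔ ∃ p ∈ rules, v ∈ p.2 := by
  induction rules with
  | nil => simp [pvFindRule]
  | cons p rest ih =>
      cases p with
      | mk name r =>
          by_cases h : r.contains v
          · simp only [pvFindRule, h, if_true, true_iff]
            exact ⟨(name, r), by simp, by simpa using h⟩
          · simp_all [pvFindRule]

theorem foldl_count (ticket : List Int) (p : Int → Bool) (n : Nat) :
    ticket.foldl (fun c v => if p v then c + 1 else c) n = n + ticket.countP p := by
  induction ticket generalizing n with
  | nil => simp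
  | cons v rest ih =>
      by_cases h : p v <;> simp [List.foldl_cons, h, ih] <;> omega

-- ===== VERDICT (by name: the statement is the Claim_ definition above) =====
theorem contains_valid_eq (rules : List (String × List Int)) (v : Int) :
    PySem.Set.contains (rules.foldl (fun s p => PySem.Set.update s p.2) (PySem.Set.empty : PySem.Set Int)) v = pvFindRule rules v := by
  rw [Bool.eq_iff_iff, PySem.Set.contains_iff, mem_foldl_update, pvFindRule_iff]
  simp [PySem.Set.empty]

theorem is_valid_ticket_spec : Claim_equal_is_valid_ticket := by
  intro rules ticket _
  unfold Spec_is_valid_ticket is_valid_ticket is_valid_ticket_alt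
  rw [foldl_count, Nat.zero_add, Bool.eq_iff_iff, beq_iff_eq, List.countP_eq_length,
    List.all_eq_true]
  simp only [contains_valid_eq]
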